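-- pv_equiv track=rewrite | github.com/jendastovik/unit-1 | Lessons/lesson14.py | blackBox3
-- ===== SOURCE A (Python) =====
-- def blackBox3(sen):
--     sen = sen.lower()
--     out = ""
--     used = {}
--     for l in sen:
--         if l == " ":
--             out += " "
--             continue
--         elif l in used:
--             used[l] += 1
--         else:
--             used[l] = 1
--         out += str(used[l])
--     return out
-- ===== SOURCE B (Python) =====
-- def blackBox3(sen):
--     sen = sen.lower()
--     return "".join(
--         " " if l == " " else str(sen[:i + 1].count(l))
--         for i, l in enumerate(sen)
--     )
-- ===== Notes on version B (the rewrite author's own statement) =====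
-- stated objective: simpler
-- what changed: Replaces A's explicit loop with a mutated dict of running counts by a single join over enumerate(sen) that, for each non-space character, counts its occurrences in the inclusive prefix sen[:i+1].
import Mathlib
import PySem

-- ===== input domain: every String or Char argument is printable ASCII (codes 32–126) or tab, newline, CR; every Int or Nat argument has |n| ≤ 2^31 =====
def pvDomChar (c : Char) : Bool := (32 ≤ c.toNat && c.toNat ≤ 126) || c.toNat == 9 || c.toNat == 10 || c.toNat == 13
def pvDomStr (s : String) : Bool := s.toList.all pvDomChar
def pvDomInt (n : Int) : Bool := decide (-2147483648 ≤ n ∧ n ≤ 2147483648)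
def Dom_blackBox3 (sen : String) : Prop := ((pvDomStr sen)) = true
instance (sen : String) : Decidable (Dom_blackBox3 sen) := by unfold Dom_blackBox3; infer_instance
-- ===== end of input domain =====

-- B replaces A's running-count dict by counting each non-space character in its inclusive prefix (simpler one-expression join; not faster).

-- ===== PORT A =====
-- A's loop body: space is copied verbatim; otherwise the dict entry is bumped (or created at 1)
-- and the updated count's digits are appended. Strings are handled on the List Char side
-- (PySem.Chars), the output accumulated as List Char and turned into a String at the end.
def blackBox3Step (st : List Char × PySem.Dict Char Int) (l : Char) :
    List Char × PySem.Dict Char Int :=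
  if l = ' ' then (st.1 ++ [' '], st.2)
  else
    let used := if st.2.contains l then st.2.insert l (st.2.getD l 0 + 1)
                else st.2.insert l 1
    (st.1 ++ PySem.Int.toChars (used.getD l 0), used)

def blackBox3 (sen : String) : String :=
  let cs := PySem.Chars.lower sen.toList
  let st := cs.foldl blackBox3Step (([] : List Char), (PySem.Dict.empty : PySem.Dict Char Int))
  String.ofList st.1

-- ===== PORT B =====
-- B: join over enumerate; a non-space char at index i contributes str(count of it in sen[:i+1]).
def blackBox3_alt (sen : String) : String :=
  let cs := PySem.Chars.lower sen.toList
  String.ofList ((PySem.List.enumerate cs 0).flatMap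
    (fun p => if p.2 = ' ' then [' ']
              else PySem.Int.toChars ((PySem.List.slice cs none (some (p.1 + 1))).count p.2)))

-- ===== PRECONDITION & SPEC =====
def Spec_blackBox3 (sen : String) (out : String) : Prop := out = blackBox3_alt sen
instance (sen : String) (out : String) : Decidable (Spec_blackBox3 sen out) := by unfold Spec_blackBox3; infer_instance

-- ===== CLAIM (what is proved, stated in full; the proofs are below) =====
def Claim_equal_blackBox3 : Prop := ∀ (sen : String), Dom_blackBox3 sen → Spec_blackBox3 sen (blackBox3 sen)

-- ===== LEMMAS AND PROOFS =====

-- Loop invariant: running A's fold over the suffix `rest` of `cs = p ++ rest`, with the dict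
-- holding the counts of the prefix `p` for every non-space character, produces exactly B's
-- prefix-count segments for the remaining positions.
lemma blackBox3_loop (cs : List Char) (rest : List Char) :
    ∀ (p acc : List Char) (used : PySem.Dict Char Int),
      cs = p ++ rest →
      (∀ c, c ≠ ' ' → used.getD c 0 = (p.count c : Int)) →
      (rest.foldl blackBox3Step (acc, used)).1
      = acc ++ (PySem.List.enumerate rest (p.length : Int)).flatMap
          (fun q => if q.2 = ' ' then [' ']
                    else PySem.Int.toChars ((PySem.List.slice cs none (some (q.1 + 1))).count q.2)) := by
  induction rest with
  | nil => intro p acc used _ _; simp [PySem.List.enumerate_nil]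
  | cons l rest ih =>
    intro p acc used hcs hinv
    rw [PySem.List.enumerate_cons, List.flatMap_cons, List.foldl_cons]
    have hlen : (p.length : Int) + 1 = ((p ++ [l]).length : Int) := by simp
    by_cases hl : l = ' '
    · subst hl
      have hstep : blackBox3Step (acc, used) ' ' = (acc ++ [' '], used) := by
        simp [blackBox3Step]
      rw [hstep, ih (p ++ [' ']) (acc ++ [' ']) used (by simpa using hcs)
            (fun c hc => by
              have h1 : List.count c [' '] = 0 := List.count_eq_zero.mpr (by simp [hc])
              rw [hinv c hc]; simp [List.count_append, h1])]
      rw [hlen]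
      simp [List.append_assoc]
    · have h0 : used.getD l 0 = (p.count l : Int) := hinv l hl
      have hbranch : (if used.contains l then used.insert l (used.getD l 0 + 1)
                      else used.insert l 1) = used.insert l ((p.count l : Int) + 1) := by
        by_cases hc : used.contains l = true
        · rw [if_pos hc, h0]
        · have hz : (p.count l : Int) = 0 := by
            rw [← h0]
            exact PySem.Dict.getD_of_not_contains _ _ (by simpa using hc)
          rw [if_neg hc, hz]; norm_num
      have hstep : blackBox3Step (acc, used) l =
          (acc ++ PySem.Int.toChars ((p.count l : Int) + 1),
           used.insert l ((p.count l : Int) + 1)) := by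
        simp only [blackBox3Step, if_neg hl, hbranch, PySem.Dict.getD_insert_self]
      have hslice : PySem.List.slice cs none (some ((p.length : Int) + 1)) = p ++ [l] := by
        have h1 : ((p.length : Int) + 1) = ((p.length + 1 : Nat) : Int) := by push_cast; ring
        rw [h1, PySem.List.slice_to_natCast, hcs, List.take_append]
        simp
      have hcnt : (((p ++ [l]).count l : Nat) : Int) = (p.count l : Int) + 1 := by
        simp [List.count_append]
      rw [hstep, ih (p ++ [l]) _ _ (by simpa using hcs)
            (fun c hc => by
              rw [PySem.Dict.getD_insert]
              by_cases hcl : c = l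
              · subst hcl; simp [List.count_append]
              · have h1 : List.count c [l] = 0 := List.count_eq_zero.mpr (by simp [hcl])
                rw [if_neg hcl, hinv c hc]
                simp [List.count_append, h1])]
      rw [if_neg hl, hslice, hcnt, hlen, List.append_assoc]

-- ===== VERDICT (by name: the statement is the Claim_ definition above) =====
theorem blackBox3_spec : Claim_equal_blackBox3 := by
  intro sen _
  unfold Spec_blackBox3 blackBox3 blackBox3_alt
  have h := blackBox3_loop (PySem.Chars.lower sen.toList) (PySem.Chars.lower sen.toList)
      [] [] PySem.Dict.empty (by simp) (fun c _ => by simp [PySem.Dict.getD_empty])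
  simp only [List.nil_append, List.length_nil, Nat.cast_zero] at h
  simp only [h]
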